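-- pv_equiv track=rewrite | github.com/YueXiao1995/algorithm | LeetCode-Python/1025 Divisor Game.py | divisorGame
-- ===== SOURCE A (Python) =====
-- def divisorGame(N):
--     is_Alice_Turn = True
--     while N > 1:
--         x = None
--         for i in reversed(range(1, N)):
--             if N % i == 0:
--                 x = i
--                 break
--         N -= x
--         is_Alice_Turn = not is_Alice_Turn
--
--     if is_Alice_Turn:
--         return False
--     else:
--         return True
-- ===== SOURCE B (Python) =====
-- def divisorGame(N):
--     # Each turn removes the largest proper divisor. For even N that divisor is
--     # N//2 (so the move halves N); for odd N it is N // p where p is the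
--     # smallest (necessarily odd) nontrivial divisor, found by odd trial
--     # division up to sqrt(N). Return the parity of the number of turns.
--     turns = 0
--     while N > 1:
--         if N % 2 == 0:
--             N //= 2
--         else:
--             p = N  # no odd divisor <= sqrt(N): N is prime, move removes N//N == 1
--             d = 3
--             while d * d <= N:
--                 if N % d == 0:
--                     p = d
--                     break
--                 d += 2
--             N -= N // p
--         turns += 1
--     return turns % 2 == 1
-- ===== Notes on version B (the rewrite author's own statement) =====
-- stated objective: faster
-- what changed: Instead of scanning downward from N-1 for the largest proper divisor, B halves even N directly and, for odd N, subtracts N // p where p is the smallest odd divisor found by odd-step trial division up to sqrt(N), returning the parity of a turn counter instead of toggling a boolean.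
import Mathlib
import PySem

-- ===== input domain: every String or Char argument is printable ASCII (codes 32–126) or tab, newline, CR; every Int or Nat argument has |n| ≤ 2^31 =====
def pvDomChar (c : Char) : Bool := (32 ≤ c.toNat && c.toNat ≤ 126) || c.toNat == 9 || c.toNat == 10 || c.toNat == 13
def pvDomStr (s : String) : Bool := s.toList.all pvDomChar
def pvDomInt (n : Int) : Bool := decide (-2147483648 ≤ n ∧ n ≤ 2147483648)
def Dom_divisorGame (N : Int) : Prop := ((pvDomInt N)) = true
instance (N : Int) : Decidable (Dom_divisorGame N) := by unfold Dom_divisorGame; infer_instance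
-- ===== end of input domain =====

-- B halves even N directly and, for odd N, divides by the smallest odd divisor found by
-- odd-step trial division up to √N, returning the parity of a turn counter (faster).

-- ===== PORT A =====
-- 'for i in reversed(range(1, N))': i = N-1, N-2, ..., 1; fuel (N-1).toNat is exactly that many steps
def pvFindDivA (N : Int) : Nat → Int → Option Int
  | 0, _ => none
  | f+1, i => if PySem.Int.mod N i == 0 then some i else pvFindDivA N f (i-1)

-- the outer 'while N > 1' with fuel N.toNat (N decreases by at least 1 per iteration)
def pvLoopA : Nat → Int → Bool → Bool
  | 0, _, alice => alice
  | f+1, N, alice =>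
    if 1 < N then
      match pvFindDivA N (N-1).toNat (N-1) with
      | some x => pvLoopA f (N - x) (!alice)
      | none => alice   -- unreachable for N > 1 (i = 1 divides N); Python would raise here
    else alice

def divisorGame (N : Int) : Bool := !(pvLoopA N.toNat N true)

-- ===== PORT B =====
-- inner 'while d * d <= N' odd trial division (d = 3, 5, 7, ...); fuel N.toNat bounds it
def pvOddSpf (N : Int) : Nat → Int → Option Int
  | 0, _ => none
  | f+1, d =>
    if d * d ≤ N then
      (if PySem.Int.mod N d == 0 then some d else pvOddSpf N f (d+2))
    else none

def pvLoopB : Nat → Int → Int → Int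
  | 0, _, t => t
  | f+1, N, t =>
    if 1 < N then
      (if PySem.Int.mod N 2 == 0 then
        pvLoopB f (PySem.Int.floordiv N 2) (t + 1)
      else
        let p := (pvOddSpf N N.toNat 3).getD N
        pvLoopB f (N - PySem.Int.floordiv N p) (t + 1))
    else t

def divisorGame_alt (N : Int) : Bool := PySem.Int.mod (pvLoopB N.toNat N 0) 2 == 1

-- ===== PRECONDITION & SPEC =====
def Spec_divisorGame (N : Int) (out : Bool) : Prop := out = divisorGame_alt N
instance (N : Int) (out : Bool) : Decidable (Spec_divisorGame N out) := by unfold Spec_divisorGame; infer_instance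

-- ===== CLAIM (what is proved, stated in full; the proofs are below) =====
def Claim_equal_divisorGame : Prop := ∀ (N : Int), Dom_divisorGame N → Spec_divisorGame N (divisorGame N)

-- ===== LEMMAS AND PROOFS =====

lemma findA_none (N : Int) : ∀ (f : Nat) (i : Int), pvFindDivA N f i = none →
    ∀ j, i - f < j → j ≤ i → PySem.Int.mod N j ≠ 0 := by
  intro f
  induction f with
  | zero => intro i _ j hj1 hj2; exfalso; simp at hj1; omega
  | succ f ih =>
    intro i h j hj1 hj2
    unfold pvFindDivA at h
    by_cases hc : PySem.Int.mod N i = 0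
    · simp [hc] at h
    · rw [if_neg (by simpa using hc)] at h
      rcases eq_or_lt_of_le hj2 with rfl | hlt
      · exact hc
      · exact ih (i-1) h j (by push_cast at hj1 ⊢; omega) (by omega)

lemma findA_some (N : Int) : ∀ (f : Nat) (i x : Int), pvFindDivA N f i = some x →
    PySem.Int.mod N x = 0 ∧ x ≤ i ∧ i - f < x ∧
      ∀ j, x < j → j ≤ i → PySem.Int.mod N j ≠ 0 := by
  intro f
  induction f with
  | zero => intro i x h; exact absurd h (by simp [pvFindDivA])
  | succ f ih =>
    intro i x h
    unfold pvFindDivA at h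
    by_cases hc : PySem.Int.mod N i = 0
    · rw [if_pos (by simpa using hc)] at h
      obtain rfl : i = x := by simpa using h
      exact ⟨hc, le_refl _, by push_cast; omega, fun j hj1 hj2 _ => by omega⟩
    · rw [if_neg (by simpa using hc)] at h
      obtain ⟨h1, h2, h3, h4⟩ := ih (i-1) x h
      refine ⟨h1, by omega, by push_cast at h3 ⊢; omega, fun j hj1 hj2 => ?_⟩
      rcases eq_or_lt_of_le hj2 with rfl | hlt
      · exact hc
      · exact h4 j hj1 (by omega)

lemma oddspf_none (N : Int) : ∀ (f : Nat) (i : Int), 0 ≤ i → pvOddSpf N f i = none →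
    ∀ j, i ≤ j → j < i + 2 * f → j % 2 = i % 2 → j * j ≤ N → PySem.Int.mod N j ≠ 0 := by
  intro f
  induction f with
  | zero => intro i _ _ j hj1 hj2; exfalso; simp at hj2; omega
  | succ f ih =>
    intro i hi h j hj1 hj2 hpar hjj
    unfold pvOddSpf at h
    by_cases hii : i * i ≤ N
    · rw [if_pos hii] at h
      by_cases hc : PySem.Int.mod N i = 0
      · simp [hc] at h
      · rw [if_neg (by simpa using hc)] at h
        rcases eq_or_lt_of_le hj1 with rfl | hlt
        · exact hc
        · have hj2' : i + 2 ≤ j := by omega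
          exact ih (i+2) (by omega) h j hj2' (by push_cast at hj2 ⊢; omega)
            (by omega) hjj
    · exfalso; nlinarith [mul_le_mul hj1 hj1 hi (le_trans hi hj1)]

lemma oddspf_some (N : Int) : ∀ (f : Nat) (i p : Int), pvOddSpf N f i = some p →
    PySem.Int.mod N p = 0 ∧ i ≤ p ∧ p * p ≤ N ∧ p % 2 = i % 2 ∧
      ∀ j, i ≤ j → j < p → j % 2 = i % 2 → PySem.Int.mod N j ≠ 0 := by
  intro f
  induction f with
  | zero => intro i p h; exact absurd h (by simp [pvOddSpf])
  | succ f ih =>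
    intro i p h
    unfold pvOddSpf at h
    by_cases hii : i * i ≤ N
    · rw [if_pos hii] at h
      by_cases hc : PySem.Int.mod N i = 0
      · rw [if_pos (by simpa using hc)] at h
        obtain rfl : i = p := by simpa using h
        exact ⟨hc, le_refl _, hii, rfl, fun j hj1 hj2 _ _ => by omega⟩
      · rw [if_neg (by simpa using hc)] at h
        obtain ⟨h1, h2, h3, h4, h5⟩ := ih (i+2) p h
        refine ⟨h1, by omega, h3, by omega, fun j hj1 hj2 hpar => ?_⟩
        rcases eq_or_lt_of_le hj1 with rfl | hlt
        · exact hc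
        · exact h5 j (by omega) hj2 (by omega)
    · rw [if_neg hii] at h; exact absurd h (by simp)

-- the amount A subtracts equals the amount B subtracts
lemma step_eq (N : Int) (hN : 1 < N) :
    ∃ x, pvFindDivA N (N-1).toNat (N-1) = some x ∧ 1 ≤ x ∧ x < N ∧
      (if PySem.Int.mod N 2 == 0 then PySem.Int.floordiv N 2
       else N - PySem.Int.floordiv N ((pvOddSpf N N.toNat 3).getD N)) = N - x := by
  have htN : ((N - 1).toNat : Int) = N - 1 := Int.toNat_of_nonneg (by omega)
  have htN2 : ((N).toNat : Int) = N := Int.toNat_of_nonneg (by omega)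
  have h1 : PySem.Int.mod N 1 = 0 := (PySem.Int.mod_eq_zero_iff_dvd N 1).mpr (one_dvd N)
  cases hA : pvFindDivA N (N-1).toNat (N-1) with
  | none => exact absurd h1 (findA_none N _ _ hA 1 (by omega) (by omega))
  | some x =>
    obtain ⟨hxm, hxle, hxgt, hmax⟩ := findA_some N _ _ _ hA
    have hxpos : 1 ≤ x := by omega
    have hxdvd : x ∣ N := (PySem.Int.mod_eq_zero_iff_dvd N x).mp hxm
    refine ⟨x, rfl, hxpos, by omega, ?_⟩
    have hq := Int.mul_ediv_cancel' hxdvd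
    set q : Int := N / x with hqdef
    have hqdvd : q ∣ N := Dvd.intro x (by linarith [hq])
    have hqpos : 0 < q := by nlinarith
    have hq2 : 2 ≤ q := by
      by_contra hcon
      have hq1 : q = 1 := by omega
      rw [hq1, mul_one] at hq
      omega
    by_cases hev : PySem.Int.mod N 2 = 0
    · -- N even: the largest proper divisor is N/2
      rw [if_pos (by simpa using hev)]
      have h2dvd : (2:Int) ∣ N := (PySem.Int.mod_eq_zero_iff_dvd N 2).mp hev
      have hh := Int.ediv_mul_cancel h2dvd
      set h : Int := N / 2 with hhdef
      have hhdvd : h ∣ N := Dvd.intro 2 (by linarith [hh])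
      have hhpos : 0 < h := by nlinarith
      have hxh : h ≤ x := by
        by_contra hcon
        exact hmax h (by omega) (by omega)
          ((PySem.Int.mod_eq_zero_iff_dvd N h).mpr hhdvd)
      have hhx : x ≤ h := by nlinarith
      rw [PySem.Int.floordiv_eq_ediv_of_pos (by norm_num : (0:Int) < 2)]
      omega
    · -- N odd: every divisor of N is odd
      rw [if_neg (by simpa using hev)]
      have hm2 : PySem.Int.mod N 2 = N % 2 := PySem.Int.mod_eq_emod_of_pos (by norm_num)
      have hNodd : N % 2 = 1 := by rw [hm2] at hev; omega
      have hodd_dvd : ∀ d : Int, d ∣ N → d % 2 = 1 ∨ d % 2 = -1 := by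
        intro d hd
        rcases Int.emod_two_eq d with h | h
        · exfalso
          have : (2:Int) ∣ d := Int.dvd_of_emod_eq_zero h
          have : (2:Int) ∣ N := this.trans hd
          omega
        · omega
      have hqodd : q % 2 = 1 := by rcases hodd_dvd q hqdvd with h | h <;> omega
      have hq3 : 3 ≤ q := by omega
      have hxodd : x % 2 = 1 := by rcases hodd_dvd x hxdvd with h | h <;> omega
      cases hB : pvOddSpf N N.toNat 3 with
      | some p =>
        obtain ⟨hpm, hp3, hpp, hppar, hpmin⟩ := oddspf_some N _ _ _ hB
        have hpdvd : p ∣ N := (PySem.Int.mod_eq_zero_iff_dvd N p).mp hpm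
        have hppos : (0:Int) < p := by omega
        simp only [Option.getD_some]
        rw [PySem.Int.floordiv_eq_ediv_of_pos hppos]
        have hk := Int.mul_ediv_cancel' hpdvd
        set k : Int := N / p with hkdef
        have hkpos : 0 < k := by nlinarith
        have hkdvd : k ∣ N := Dvd.intro p (by linarith [hk])
        have hkltN : k < N := by nlinarith
        have hkx : k ≤ x := by
          by_contra hcon
          exact hmax k (by omega) (by omega)
            ((PySem.Int.mod_eq_zero_iff_dvd N k).mpr hkdvd)
        have hpq : p ≤ q := by
          by_contra hcon
          exact hpmin q hq3 (by omega) (by omega)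
            ((PySem.Int.mod_eq_zero_iff_dvd N q).mpr hqdvd)
        have hxk : x ≤ k := by nlinarith
        omega
      | none =>
        have hnone := oddspf_none N _ _ (by norm_num) hB
        simp only [Option.getD_none]
        rw [PySem.Int.floordiv_eq_ediv_of_pos (by omega : (0:Int) < N),
          Int.ediv_self (by omega : N ≠ 0)]
        by_contra hx1
        have hx3 : 3 ≤ x := by omega
        have hqle : q ≤ N - 1 := by nlinarith
        by_cases hxx : x * x ≤ N
        · have hxb : x < 3 + 2 * (N.toNat : Int) := by omega
          exact hnone x hx3 (by omega) (by omega) hxx hxm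
        · have hxx' : N + 1 ≤ x * x := by linarith [lt_of_not_ge hxx]
          have hmul : q * q * (x * x) = N * N := by rw [← hq]; ring
          have hqq : q * q ≤ N := by nlinarith [hmul, hxx', mul_pos hqpos hqpos]
          exact hnone q hq3 (by omega) (by omega) hqq
            ((PySem.Int.mod_eq_zero_iff_dvd N q).mpr hqdvd)

lemma loop_eq : ∀ (f : Nat) (N : Int) (alice : Bool) (t : Int),
    alice = decide (PySem.Int.mod t 2 = 0) →
    (!(pvLoopA f N alice)) = (PySem.Int.mod (pvLoopB f N t) 2 == 1) := by
  have hm2 : ∀ s : Int, PySem.Int.mod s 2 = s % 2 :=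
    fun s => PySem.Int.mod_eq_emod_of_pos (by norm_num)
  intro f
  induction f with
  | zero =>
    intro N alice t ht
    subst ht
    simp only [pvLoopA, pvLoopB, hm2]
    rcases Int.emod_two_eq t with h | h <;> simp [h]
  | succ f ih =>
    intro N alice t ht
    by_cases hN : 1 < N
    · obtain ⟨x, hA, hx1, hxN, hxe⟩ := step_eq N hN
      show (!(pvLoopA (f+1) N alice)) = (PySem.Int.mod (pvLoopB (f+1) N t) 2 == 1)
      have hBstep : pvLoopB (f+1) N t = pvLoopB f (N - x) (t+1) := by
        show (if 1 < N then
            (if PySem.Int.mod N 2 == 0 then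
              pvLoopB f (PySem.Int.floordiv N 2) (t + 1)
            else
              pvLoopB f (N - PySem.Int.floordiv N ((pvOddSpf N N.toNat 3).getD N)) (t + 1))
          else t) = _
        rw [if_pos hN]
        split_ifs at hxe with hc
        · rw [if_pos hc, hxe]
        · rw [if_neg hc, hxe]
      have hAstep : pvLoopA (f+1) N alice = pvLoopA f (N - x) (!alice) := by
        show (if 1 < N then
            (match pvFindDivA N (N-1).toNat (N-1) with
              | some y => pvLoopA f (N - y) (!alice)
              | none => alice)
          else alice) = _
        rw [if_pos hN, hA]
      rw [hAstep, hBstep]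
      refine ih (N - x) (!alice) (t+1) ?_
      subst ht
      simp only [hm2]
      rcases Int.emod_two_eq t with h | h
      · have h1 : (t + 1) % 2 = 1 := by omega
        simp [h, h1]
      · have h1 : (t + 1) % 2 = 0 := by omega
        simp [h, h1]
    · subst ht
      unfold pvLoopA pvLoopB
      rw [if_neg hN, if_neg hN]
      simp only [hm2]
      rcases Int.emod_two_eq t with h | h <;> simp [h]

-- ===== VERDICT (by name: the statement is the Claim_ definition above) =====
theorem divisorGame_spec : Claim_equal_divisorGame := by
  intro N _
  unfold Spec_divisorGame divisorGame divisorGame_alt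
  exact loop_eq N.toNat N true 0 (by decide)
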